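-- pv_equiv track=rewrite | github.com/sandersyen/CS-839-Data-Science-Project | Stage 1/code/featureIdentifier.py | contains_organization
-- ===== SOURCE A (Python) =====
-- def contains_organization(ngram, organ_set):
--     """
--     Identify if a n-gram has organization titles, return 1 (has feature) 0 (no such feature)
--     :param ngram: a ngram
--     :param organ_set: a set contains commom organization titles
--     :return: 1 (has feature) or 0 (no such feature)
--     """
--     # find if any word in current ngram has country name
--     words = ngram[0].split(' ')
--     for word in words:
--         if word.lower() in organ_set:
--             return 1
--
--     if len(words) >= 2:
--         for i in range(1, len(words)):
--             if (words[i-1]+' '+words[i]).lower() in organ_set: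
--                 return 1
--     return 0
-- ===== SOURCE B (Python) =====
-- def contains_organization(ngram, organ_set):
--     """
--     Identify if a n-gram has organization titles, return 1 (has feature) 0 (no such feature)
--     Re-implementation: one fused left-to-right pass carrying the previously seen
--     lowercased word; each word is lowercased once and the bigram probe is built
--     from the cached previous word, so there is no second indexed scan and no
--     length guard.
--     """
--     prev = None
--     for w in ngram[0].split(' '):
--         cur = w.lower()
--         if cur in organ_set:
--             return 1
--         if prev is not None and prev + ' ' + cur in organ_set:
--             return 1
--         prev = cur
--     return 0
-- ===== Notes on version B (the rewrite author's own statement) =====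
-- stated objective: alternative
-- what changed: A runs two staged scans (all unigrams with early return, then an index loop over range(1,len) rebuilding and re-lowercasing each bigram, guarded by len>=2); B is one fused pass with a prev-accumulator that lowercases each word exactly once, probes the unigram and the bigram built from the cached lowered previous word together, and needs no indices or length guard.
import Mathlib
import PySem

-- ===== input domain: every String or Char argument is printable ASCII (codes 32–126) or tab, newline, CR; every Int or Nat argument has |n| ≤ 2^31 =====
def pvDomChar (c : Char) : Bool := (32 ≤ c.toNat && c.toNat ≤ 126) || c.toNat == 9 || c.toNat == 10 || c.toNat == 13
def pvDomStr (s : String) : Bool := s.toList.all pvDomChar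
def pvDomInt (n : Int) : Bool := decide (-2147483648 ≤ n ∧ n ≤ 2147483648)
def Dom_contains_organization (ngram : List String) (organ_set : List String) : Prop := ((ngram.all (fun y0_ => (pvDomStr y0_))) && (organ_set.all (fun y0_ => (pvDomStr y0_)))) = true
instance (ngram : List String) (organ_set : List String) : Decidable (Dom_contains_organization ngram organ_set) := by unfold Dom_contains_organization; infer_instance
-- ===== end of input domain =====

-- B replaces A's two staged scans (unigrams, then an index loop over bigrams) by one fused
-- pass carrying the previously lowered word as an accumulator (objective: alternative).

-- ===== PORT A =====
-- A scans the words with early return, then (guarded by len >= 2) scans index range 1..len-1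
-- forming bigrams words[i-1]+' '+words[i]. Indices are always in range, so pyGetD is exact here.
def contains_organization (ngram : List String) (organ_set : List String) : Int :=
  match ngram with
  | [] => 0  -- unreachable under Pre_ (Python raises IndexError on ngram[0])
  | g :: _ =>
    let words := (PySem.Str.split? g " ").getD []
    if words.any (fun w => organ_set.contains (PySem.Str.lower w)) then 1
    else if 2 ≤ words.length then
      if (PySem.List.pyRange 1 (words.length : Int) 1).any (fun i =>
            organ_set.contains (PySem.Str.lower
              (PySem.List.pyGetD words (i-1) "" ++ " " ++ PySem.List.pyGetD words i ""))) then 1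
      else 0
    else 0

-- ===== PORT B =====
-- B's loop over the words with the 'prev' accumulator, as structural recursion on the word list.
def pvScanOrg (organ_set : List String) (prev : Option String) (rest : List String) : Int :=
  match rest with
  | [] => 0
  | w :: rs =>
    let cur := PySem.Str.lower w
    if organ_set.contains cur then 1
    else
      match prev with
      | some p => if organ_set.contains (p ++ " " ++ cur) then 1 else pvScanOrg organ_set (some cur) rs
      | none => pvScanOrg organ_set (some cur) rs

def contains_organization_alt (ngram : List String) (organ_set : List String) : Int :=
  match ngram with
  | [] => 0  -- unreachable under Pre_ (Python raises IndexError on ngram[0])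
  | g :: _ => pvScanOrg organ_set none ((PySem.Str.split? g " ").getD [])

-- ===== PRECONDITION & SPEC =====
-- Pre_ excludes only the empty ngram, on which Python A raises IndexError.
def Pre_contains_organization (ngram : List String) (organ_set : List String) : Prop :=
  ngram ≠ []
instance (ngram : List String) (organ_set : List String) : Decidable (Pre_contains_organization ngram organ_set) := by unfold Pre_contains_organization; infer_instance

def pvWitness_contains_organization : List String × List String := (["acme inc"], ["inc"])

def Spec_contains_organization (ngram : List String) (organ_set : List String) (out : Int) : Prop := out = contains_organization_alt ngram organ_set
instance (ngram : List String) (organ_set : List String) (out : Int) : Decidable (Spec_contains_organization ngram organ_set out) := by unfold Spec_contains_organization; infer_instance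

-- ===== CLAIM (what is proved, stated in full; the proofs are below) =====
def Claim_equal_contains_organization : Prop := ∀ (ngram : List String) (organ_set : List String), Dom_contains_organization ngram organ_set → Pre_contains_organization ngram organ_set → Spec_contains_organization ngram organ_set (contains_organization ngram organ_set)

-- ===== LEMMAS AND PROOFS =====

-- lower distributes over append (it is the character-wise map).
theorem pv_lower_append (a b : String) :
    PySem.Str.lower (a ++ b) = PySem.Str.lower a ++ PySem.Str.lower b := by
  apply String.toList_inj.mp
  simp [PySem.Str.toList_lower, PySem.Chars.lower]

-- A's range scan of bigrams equals a zip-with-tail scan.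
theorem pv_range_any_eq_zip_any (l : List String) (g : String → String → Bool) :
    ((PySem.List.pyRange 1 (l.length : Int) 1).any (fun i =>
        g (PySem.List.pyGetD l (i-1) "") (PySem.List.pyGetD l i "")) = true)
    ↔ ((l.zip l.tail).any (fun p => g p.1 p.2) = true) := by
  simp only [List.any_eq_true]
  constructor
  · rintro ⟨i, hi, hg⟩
    rw [PySem.List.mem_pyRange_one] at hi
    obtain ⟨h1, h2⟩ := hi
    lift i to ℕ using (by omega) with k
    have hk1 : 1 ≤ k := by exact_mod_cast h1
    have hk2 : k < l.length := by exact_mod_cast h2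
    refine ⟨(l[k-1], l[k]), ?_, ?_⟩
    · rw [List.mem_iff_getElem]
      refine ⟨k-1, by simp only [List.length_zip, List.length_tail]; omega, ?_⟩
      rw [List.getElem_zip]
      congr 1
      rw [List.getElem_tail]
      congr 1
      omega
    · have e1 : PySem.List.pyGetD l ((k : Int) - 1) "" = l[k-1] := by
        rw [show ((k : Int) - 1) = ((k - 1 : ℕ) : Int) by omega, PySem.List.pyGetD_natCast]
        simp [List.getD_eq_getElem?_getD, List.getElem?_eq_getElem (show k - 1 < l.length by omega)]
      have e2 : PySem.List.pyGetD l (k : Int) "" = l[k] := by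
        rw [PySem.List.pyGetD_natCast]
        simp [List.getD_eq_getElem?_getD, List.getElem?_eq_getElem hk2]
      rw [e1, e2] at hg
      exact hg
  · rintro ⟨p, hp, hg⟩
    rw [List.mem_iff_getElem] at hp
    obtain ⟨k, hk, rfl⟩ := hp
    have hk' : k + 1 < l.length := by
      simp only [List.length_zip, List.length_tail] at hk; omega
    refine ⟨((k + 1 : ℕ) : Int), ?_, ?_⟩
    · rw [PySem.List.mem_pyRange_one]
      constructor
      · omega
      · exact_mod_cast hk'
    · rw [List.getElem_zip] at hg
      have e1 : PySem.List.pyGetD l (((k + 1 : ℕ) : Int) - 1) "" = l[k] := by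
        rw [show (((k + 1 : ℕ) : Int) - 1) = ((k : ℕ) : Int) by omega, PySem.List.pyGetD_natCast]
        simp [List.getD_eq_getElem?_getD, List.getElem?_eq_getElem (show k < l.length by omega)]
      have e2 : PySem.List.pyGetD l ((k + 1 : ℕ) : Int) "" = l[k+1] := by
        rw [PySem.List.pyGetD_natCast]
        simp [List.getD_eq_getElem?_getD, List.getElem?_eq_getElem hk']
      rw [e1, e2]
      simpa [List.getElem_tail] using hg

-- The 'chain' seen by the fused scan: the optional previous lowered word, then the lowered rest.
def pvChain (prev : Option String) (rest : List String) : List String :=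
  match prev with
  | none => rest.map PySem.Str.lower
  | some p => p :: rest.map PySem.Str.lower

-- Characterisation of B's fused scan as the two existentials over the chain.
theorem pv_scan_eq (S : List String) (prev : Option String) (rest : List String) :
    pvScanOrg S prev rest =
      (if (rest.map PySem.Str.lower).any (fun w => S.contains w)
          || ((pvChain prev rest).zip (pvChain prev rest).tail).any
               (fun p => S.contains (p.1 ++ " " ++ p.2)) then 1 else 0) := by
  induction rest generalizing prev with
  | nil => cases prev <;> simp [pvScanOrg, pvChain]
  | cons w rs ih =>
    cases prev with
    | none =>
      simp only [pvScanOrg, pvChain, List.map_cons]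
      by_cases h1 : PySem.Str.lower w ∈ S
      · simp [h1]
      · rw [ih (some (PySem.Str.lower w))]
        have h1' : S.contains (PySem.Str.lower w) = false := by simpa using h1
        simp only [pvChain, List.any_cons, List.tail_cons, h1',
          Bool.false_eq_true, if_false, Bool.false_or]
        rfl
    | some p =>
      simp only [pvScanOrg, pvChain, List.map_cons]
      by_cases h1 : PySem.Str.lower w ∈ S
      · simp [h1]
      · by_cases h2 : p ++ " " ++ PySem.Str.lower w ∈ S
        · simp [h1, h2, List.any_cons]
        · rw [ih (some (PySem.Str.lower w))]
          have h1' : S.contains (PySem.Str.lower w) = false := by simpa using h1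
          have h2' : S.contains (p ++ " " ++ PySem.Str.lower w) = false := by simpa using h2
          simp only [pvChain, List.any_cons, List.tail_cons, List.zip_cons_cons, h1', h2',
            Bool.false_eq_true, if_false, Bool.false_or]
          rfl

-- ===== VERDICT (by name: the statement is the Claim_ definition above) =====
theorem contains_organization_spec : Claim_equal_contains_organization := by
  intro ngram organ_set _ hpre
  unfold Spec_contains_organization
  match ngram with
  | [] => exact absurd rfl hpre
  | g :: rest =>
    simp only [contains_organization, contains_organization_alt]
    set words := (PySem.Str.split? g " ").getD [] with hw
    rw [pv_scan_eq]
    have hchain : pvChain none words = words.map PySem.Str.lower := rfl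
    have hzipmap : ((words.map PySem.Str.lower).zip (words.map PySem.Str.lower).tail).any
          (fun p => organ_set.contains (p.1 ++ " " ++ p.2))
        = (words.zip words.tail).any
            (fun p => organ_set.contains (PySem.Str.lower p.1 ++ " " ++ PySem.Str.lower p.2)) := by
      rw [← List.map_tail, List.zip_map, List.any_map]
      rfl
    have hlow : ∀ a b : String,
        PySem.Str.lower (a ++ " " ++ b) = PySem.Str.lower a ++ " " ++ PySem.Str.lower b := by
      intro a b
      rw [pv_lower_append, pv_lower_append]
      have : PySem.Str.lower " " = " " := by decide
      rw [this]
    have hrange := pv_range_any_eq_zip_any words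
      (fun a b => organ_set.contains (PySem.Str.lower (a ++ " " ++ b)))
    by_cases c1 : words.any (fun w => organ_set.contains (PySem.Str.lower w)) = true
    · have c1' : (words.map PySem.Str.lower).any (fun w => organ_set.contains w) = true := by
        simpa [List.any_map, Function.comp] using c1
      rw [if_pos c1, c1']
      simp
    · have c1' : (words.map PySem.Str.lower).any (fun w => organ_set.contains w) = false := by
        rw [Bool.eq_false_iff]
        intro h
        exact c1 (by simpa [List.any_map, Function.comp] using h)
      by_cases clen : 2 ≤ words.length
      · by_cases c2 : (PySem.List.pyRange 1 (words.length : Int) 1).any (fun i =>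
            organ_set.contains (PySem.Str.lower
              (PySem.List.pyGetD words (i-1) "" ++ " " ++ PySem.List.pyGetD words i ""))) = true
        · have hz := hrange.mp c2
          have : ((pvChain none words).zip (pvChain none words).tail).any
              (fun p => organ_set.contains (p.1 ++ " " ++ p.2)) = true := by
            rw [hchain, hzipmap]
            simp only [List.any_eq_true] at hz ⊢
            obtain ⟨p, hp, hg⟩ := hz
            exact ⟨p, hp, by rw [← hlow]; exact hg⟩
          rw [if_neg c1, if_pos clen, if_pos c2, c1', this]
          simp
        · have hz : ((pvChain none words).zip (pvChain none words).tail).any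
              (fun p => organ_set.contains (p.1 ++ " " ++ p.2)) = false := by
            rw [hchain, hzipmap, Bool.eq_false_iff]
            intro h
            apply c2
            apply hrange.mpr
            simp only [List.any_eq_true] at h ⊢
            obtain ⟨p, hp, hg⟩ := h
            exact ⟨p, hp, by rw [hlow]; exact hg⟩
          rw [if_neg c1, if_pos clen, if_neg c2, c1', hz]
          simp
      · have htail : words.zip words.tail = [] := by
          apply List.eq_nil_of_length_eq_zero
          simp only [List.length_zip, List.length_tail]
          omega
        have hz : ((pvChain none words).zip (pvChain none words).tail).any
            (fun p => organ_set.contains (p.1 ++ " " ++ p.2)) = false := by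
          rw [hchain, hzipmap, htail]
          rfl
        rw [if_neg c1, if_neg clen, c1', hz]
        simp
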